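-- pv_equiv track=rewrite | github.com/IvanMilovanovic13/krojna-lista-pro | visualization.py | _detect_type
-- ===== SOURCE A (Python) =====
-- from typing import Any, Dict, List, Tuple, Optional
--
-- def _detect_type(m: Dict[str, Any]) -> str:
--     """
--     Vraca tip elementa:
--       'drawers', 'sink', 'hob', 'oven', 'dishwasher', 'fridge',
--       'corner', 'narrow', 'hood', 'microwave', 'glass', 'liftup',
--       'open', 'doors_drawers', 'doors'
--     """
--     tid = str(m.get("template_id", "")).upper()
--     lbl = str(m.get("label", "")).lower()
--     features = m.get("params", {}) or {}
--     # Iz template_id-a (pouzdan)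
--     if tid == "BASE_DISHWASHER_FREESTANDING": return "dishwasher_freestanding"
--     if tid == "BASE_OVEN_HOB_FREESTANDING": return "oven_hob_freestanding"
--     if "DISHWASHER"    in tid: return "dishwasher"
--     if "END_PANEL"     in tid: return "panel"
--     if "FILLER_PANEL"  in tid: return "panel"
--     if "COOKING_UNIT"  in tid: return "oven_hob"
--     if "OVEN_HOB"      in tid: return "oven_hob"
--     if "HOB"           in tid: return "hob"
--     if "SINK"          in tid: return "sink"
--     if "OVEN_MICRO"    in tid: return "oven_micro"
--     if "OVEN"          in tid: return "oven"
--     if "FRIDGE_FREEZE" in tid: return "fridge"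
--     if "FRIDGE_UNDER"  in tid: return "fridge_under"   # donji dio ugradnog frižidera (base zona)
--     if "FRIDGE"        in tid: return "fridge"
--     if "HOOD"          in tid: return "hood"
--     if "MICRO"         in tid: return "microwave"
--     if "NARROW"        in tid: return "narrow"
--     if "CORNER"        in tid: return "corner"
--     if "GLASS"         in tid: return "glass"
--     if "LIFTUP"        in tid: return "liftup"
--     if "DRAWERS"       in tid: return "drawers"
--     if "DOORS_DRAW"    in tid: return "doors_drawers"
--     if "DOOR_DRAWER"   in tid: return "doors_drawers"
--     if "OPEN"          in tid: return "open"
--     if "PANTRY"        in tid: return "pantry"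
--     # Iz labele
--     if any(k in lbl for k in ("fiok", "ladic", "drawer")): return "drawers"
--     if any(k in lbl for k in ("sudoper", "cesm", "sink")):  return "sink"
--     if any(k in lbl for k in ("ploc", "hob", "ringla")):    return "hob"
--     if any(k in lbl for k in ("rerna", "oven")):            return "oven"
--     if any(k in lbl for k in ("masina", "dishwash")):       return "dishwasher"
--     if any(k in lbl for k in ("frizider", "fridge")):       return "fridge"
--     if any(k in lbl for k in ("napa", "aspirat", "hood")):  return "hood"
--     if any(k in lbl for k in ("mikrotal", "micro")):        return "microwave"
--     if any(k in lbl for k in ("uski", "narrow")):           return "narrow"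
--     if any(k in lbl for k in ("coskast", "ugaon", "corner")): return "corner"
--     if any(k in lbl for k in ("stakl", "glass")):           return "glass"
--     if any(k in lbl for k in ("klapna", "podiz", "liftup")): return "liftup"
--     if any(k in lbl for k in ("otvor", "polica", "open")):  return "open"
--     if any(k in lbl for k in ("ostava", "spajz", "pant")):  return "pantry"
--     return "doors"
-- ===== SOURCE B (Python) =====
-- # B: flat keyword table; collect ALL matching keywords exhaustively (no early exit,
-- # no grouped any()), then select the result of the lowest-priority hit; default "doors".
-- _KEYWORDS = [
--     (0, 't', 'eq', 'BASE_DISHWASHER_FREESTANDING', 'dishwasher_freestanding'),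
--     (1, 't', 'eq', 'BASE_OVEN_HOB_FREESTANDING', 'oven_hob_freestanding'),
--     (2, 't', 'sub', 'DISHWASHER', 'dishwasher'),
--     (3, 't', 'sub', 'END_PANEL', 'panel'),
--     (4, 't', 'sub', 'FILLER_PANEL', 'panel'),
--     (5, 't', 'sub', 'COOKING_UNIT', 'oven_hob'),
--     (6, 't', 'sub', 'OVEN_HOB', 'oven_hob'),
--     (7, 't', 'sub', 'HOB', 'hob'),
--     (8, 't', 'sub', 'SINK', 'sink'),
--     (9, 't', 'sub', 'OVEN_MICRO', 'oven_micro'),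
--     (10, 't', 'sub', 'OVEN', 'oven'),
--     (11, 't', 'sub', 'FRIDGE_FREEZE', 'fridge'),
--     (12, 't', 'sub', 'FRIDGE_UNDER', 'fridge_under'),
--     (13, 't', 'sub', 'FRIDGE', 'fridge'),
--     (14, 't', 'sub', 'HOOD', 'hood'),
--     (15, 't', 'sub', 'MICRO', 'microwave'),
--     (16, 't', 'sub', 'NARROW', 'narrow'),
--     (17, 't', 'sub', 'CORNER', 'corner'),
--     (18, 't', 'sub', 'GLASS', 'glass'),
--     (19, 't', 'sub', 'LIFTUP', 'liftup'),
--     (20, 't', 'sub', 'DRAWERS', 'drawers'),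
--     (21, 't', 'sub', 'DOORS_DRAW', 'doors_drawers'),
--     (22, 't', 'sub', 'DOOR_DRAWER', 'doors_drawers'),
--     (23, 't', 'sub', 'OPEN', 'open'),
--     (24, 't', 'sub', 'PANTRY', 'pantry'),
--     (25, 'l', 'sub', 'fiok', 'drawers'),
--     (25, 'l', 'sub', 'ladic', 'drawers'),
--     (25, 'l', 'sub', 'drawer', 'drawers'),
--     (26, 'l', 'sub', 'sudoper', 'sink'),
--     (26, 'l', 'sub', 'cesm', 'sink'),
--     (26, 'l', 'sub', 'sink', 'sink'),
--     (27, 'l', 'sub', 'ploc', 'hob'),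
--     (27, 'l', 'sub', 'hob', 'hob'),
--     (27, 'l', 'sub', 'ringla', 'hob'),
--     (28, 'l', 'sub', 'rerna', 'oven'),
--     (28, 'l', 'sub', 'oven', 'oven'),
--     (29, 'l', 'sub', 'masina', 'dishwasher'),
--     (29, 'l', 'sub', 'dishwash', 'dishwasher'),
--     (30, 'l', 'sub', 'frizider', 'fridge'),
--     (30, 'l', 'sub', 'fridge', 'fridge'),
--     (31, 'l', 'sub', 'napa', 'hood'),
--     (31, 'l', 'sub', 'aspirat', 'hood'),
--     (31, 'l', 'sub', 'hood', 'hood'),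
--     (32, 'l', 'sub', 'mikrotal', 'microwave'),
--     (32, 'l', 'sub', 'micro', 'microwave'),
--     (33, 'l', 'sub', 'uski', 'narrow'),
--     (33, 'l', 'sub', 'narrow', 'narrow'),
--     (34, 'l', 'sub', 'coskast', 'corner'),
--     (34, 'l', 'sub', 'ugaon', 'corner'),
--     (34, 'l', 'sub', 'corner', 'corner'),
--     (35, 'l', 'sub', 'stakl', 'glass'),
--     (35, 'l', 'sub', 'glass', 'glass'),
--     (36, 'l', 'sub', 'klapna', 'liftup'),
--     (36, 'l', 'sub', 'podiz', 'liftup'),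
--     (36, 'l', 'sub', 'liftup', 'liftup'),
--     (37, 'l', 'sub', 'otvor', 'open'),
--     (37, 'l', 'sub', 'polica', 'open'),
--     (37, 'l', 'sub', 'open', 'open'),
--     (38, 'l', 'sub', 'ostava', 'pantry'),
--     (38, 'l', 'sub', 'spajz', 'pantry'),
--     (38, 'l', 'sub', 'pant', 'pantry'),]
--
-- def _detect_type(m):
--     tid = str(m.get("template_id", "")).upper()
--     lbl = str(m.get("label", "")).lower()
--     hits = [(p, r)
--             for (p, f, mo, k, r) in _KEYWORDS
--             if (((tid if f == 't' else lbl) == k) if mo == 'eq'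
--                 else (k in (tid if f == 't' else lbl)))]
--     return min(hits, key=lambda h: h[0])[1] if hits else "doors"
-- ===== Notes on version B (the rewrite author's own statement) =====
-- stated objective: alternative
-- what changed: Instead of an ordered early-return if-chain, B flattens every keyword into a prioritised flat table, exhaustively collects ALL matching keywords with no short-circuit, and then selects the hit of minimal priority (default 'doors'): collect-then-argmin instead of first-match dispatch.
import Mathlib
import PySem

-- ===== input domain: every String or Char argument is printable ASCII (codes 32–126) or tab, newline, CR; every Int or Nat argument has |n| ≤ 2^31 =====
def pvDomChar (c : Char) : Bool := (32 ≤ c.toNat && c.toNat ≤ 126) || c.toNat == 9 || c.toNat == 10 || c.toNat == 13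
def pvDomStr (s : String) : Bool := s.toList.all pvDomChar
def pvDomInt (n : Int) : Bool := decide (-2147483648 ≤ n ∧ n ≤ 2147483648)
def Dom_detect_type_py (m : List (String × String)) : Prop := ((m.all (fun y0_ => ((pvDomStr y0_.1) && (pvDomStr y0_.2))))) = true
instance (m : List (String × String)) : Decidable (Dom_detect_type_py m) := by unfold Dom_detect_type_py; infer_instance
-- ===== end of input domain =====

-- B replaces A's early-return if-chain by an exhaustive flat keyword scan that collects all
-- matches and selects the minimal-priority hit; objective: alternative algorithm, same cost.

-- ===== PORT A =====
-- literal transliteration of A's if-chain ('params' is fetched but never used, so it is omitted)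
def detect_type_py (m : List (String × String)) : String :=
  let tid := PySem.Str.upper (PySem.Dict.getD (PySem.Dict.mk m) "template_id" "")
  let lbl := PySem.Str.lower (PySem.Dict.getD (PySem.Dict.mk m) "label" "")
  if tid == "BASE_DISHWASHER_FREESTANDING" then "dishwasher_freestanding" else
  if tid == "BASE_OVEN_HOB_FREESTANDING" then "oven_hob_freestanding" else
  if PySem.Str.isIn "DISHWASHER" tid then "dishwasher" else
  if PySem.Str.isIn "END_PANEL" tid then "panel" else
  if PySem.Str.isIn "FILLER_PANEL" tid then "panel" else
  if PySem.Str.isIn "COOKING_UNIT" tid then "oven_hob" else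
  if PySem.Str.isIn "OVEN_HOB" tid then "oven_hob" else
  if PySem.Str.isIn "HOB" tid then "hob" else
  if PySem.Str.isIn "SINK" tid then "sink" else
  if PySem.Str.isIn "OVEN_MICRO" tid then "oven_micro" else
  if PySem.Str.isIn "OVEN" tid then "oven" else
  if PySem.Str.isIn "FRIDGE_FREEZE" tid then "fridge" else
  if PySem.Str.isIn "FRIDGE_UNDER" tid then "fridge_under" else
  if PySem.Str.isIn "FRIDGE" tid then "fridge" else
  if PySem.Str.isIn "HOOD" tid then "hood" else
  if PySem.Str.isIn "MICRO" tid then "microwave" else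
  if PySem.Str.isIn "NARROW" tid then "narrow" else
  if PySem.Str.isIn "CORNER" tid then "corner" else
  if PySem.Str.isIn "GLASS" tid then "glass" else
  if PySem.Str.isIn "LIFTUP" tid then "liftup" else
  if PySem.Str.isIn "DRAWERS" tid then "drawers" else
  if PySem.Str.isIn "DOORS_DRAW" tid then "doors_drawers" else
  if PySem.Str.isIn "DOOR_DRAWER" tid then "doors_drawers" else
  if PySem.Str.isIn "OPEN" tid then "open" else
  if PySem.Str.isIn "PANTRY" tid then "pantry" else
  if PySem.Str.isIn "fiok" lbl || PySem.Str.isIn "ladic" lbl || PySem.Str.isIn "drawer" lbl then "drawers" else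
  if PySem.Str.isIn "sudoper" lbl || PySem.Str.isIn "cesm" lbl || PySem.Str.isIn "sink" lbl then "sink" else
  if PySem.Str.isIn "ploc" lbl || PySem.Str.isIn "hob" lbl || PySem.Str.isIn "ringla" lbl then "hob" else
  if PySem.Str.isIn "rerna" lbl || PySem.Str.isIn "oven" lbl then "oven" else
  if PySem.Str.isIn "masina" lbl || PySem.Str.isIn "dishwash" lbl then "dishwasher" else
  if PySem.Str.isIn "frizider" lbl || PySem.Str.isIn "fridge" lbl then "fridge" else
  if PySem.Str.isIn "napa" lbl || PySem.Str.isIn "aspirat" lbl || PySem.Str.isIn "hood" lbl then "hood" else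
  if PySem.Str.isIn "mikrotal" lbl || PySem.Str.isIn "micro" lbl then "microwave" else
  if PySem.Str.isIn "uski" lbl || PySem.Str.isIn "narrow" lbl then "narrow" else
  if PySem.Str.isIn "coskast" lbl || PySem.Str.isIn "ugaon" lbl || PySem.Str.isIn "corner" lbl then "corner" else
  if PySem.Str.isIn "stakl" lbl || PySem.Str.isIn "glass" lbl then "glass" else
  if PySem.Str.isIn "klapna" lbl || PySem.Str.isIn "podiz" lbl || PySem.Str.isIn "liftup" lbl then "liftup" else
  if PySem.Str.isIn "otvor" lbl || PySem.Str.isIn "polica" lbl || PySem.Str.isIn "open" lbl then "open" else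
  if PySem.Str.isIn "ostava" lbl || PySem.Str.isIn "spajz" lbl || PySem.Str.isIn "pant" lbl then "pantry" else
  "doors"

-- ===== PORT B =====
-- Source B's flat keyword table: (priority, field \'t\'/\'l\', mode \'eq\'/\'sub\', keyword, result)
def pvKeywords : List (Nat × String × String × String × String) := [
    (0, "t", "eq", "BASE_DISHWASHER_FREESTANDING", "dishwasher_freestanding"),
    (1, "t", "eq", "BASE_OVEN_HOB_FREESTANDING", "oven_hob_freestanding"),
    (2, "t", "sub", "DISHWASHER", "dishwasher"),
    (3, "t", "sub", "END_PANEL", "panel"),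
    (4, "t", "sub", "FILLER_PANEL", "panel"),
    (5, "t", "sub", "COOKING_UNIT", "oven_hob"),
    (6, "t", "sub", "OVEN_HOB", "oven_hob"),
    (7, "t", "sub", "HOB", "hob"),
    (8, "t", "sub", "SINK", "sink"),
    (9, "t", "sub", "OVEN_MICRO", "oven_micro"),
    (10, "t", "sub", "OVEN", "oven"),
    (11, "t", "sub", "FRIDGE_FREEZE", "fridge"),
    (12, "t", "sub", "FRIDGE_UNDER", "fridge_under"),
    (13, "t", "sub", "FRIDGE", "fridge"),
    (14, "t", "sub", "HOOD", "hood"),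
    (15, "t", "sub", "MICRO", "microwave"),
    (16, "t", "sub", "NARROW", "narrow"),
    (17, "t", "sub", "CORNER", "corner"),
    (18, "t", "sub", "GLASS", "glass"),
    (19, "t", "sub", "LIFTUP", "liftup"),
    (20, "t", "sub", "DRAWERS", "drawers"),
    (21, "t", "sub", "DOORS_DRAW", "doors_drawers"),
    (22, "t", "sub", "DOOR_DRAWER", "doors_drawers"),
    (23, "t", "sub", "OPEN", "open"),
    (24, "t", "sub", "PANTRY", "pantry"),
    (25, "l", "sub", "fiok", "drawers"),
    (25, "l", "sub", "ladic", "drawers"),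
    (25, "l", "sub", "drawer", "drawers"),
    (26, "l", "sub", "sudoper", "sink"),
    (26, "l", "sub", "cesm", "sink"),
    (26, "l", "sub", "sink", "sink"),
    (27, "l", "sub", "ploc", "hob"),
    (27, "l", "sub", "hob", "hob"),
    (27, "l", "sub", "ringla", "hob"),
    (28, "l", "sub", "rerna", "oven"),
    (28, "l", "sub", "oven", "oven"),
    (29, "l", "sub", "masina", "dishwasher"),
    (29, "l", "sub", "dishwash", "dishwasher"),
    (30, "l", "sub", "frizider", "fridge"),
    (30, "l", "sub", "fridge", "fridge"),
    (31, "l", "sub", "napa", "hood"),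
    (31, "l", "sub", "aspirat", "hood"),
    (31, "l", "sub", "hood", "hood"),
    (32, "l", "sub", "mikrotal", "microwave"),
    (32, "l", "sub", "micro", "microwave"),
    (33, "l", "sub", "uski", "narrow"),
    (33, "l", "sub", "narrow", "narrow"),
    (34, "l", "sub", "coskast", "corner"),
    (34, "l", "sub", "ugaon", "corner"),
    (34, "l", "sub", "corner", "corner"),
    (35, "l", "sub", "stakl", "glass"),
    (35, "l", "sub", "glass", "glass"),
    (36, "l", "sub", "klapna", "liftup"),
    (36, "l", "sub", "podiz", "liftup"),
    (36, "l", "sub", "liftup", "liftup"),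
    (37, "l", "sub", "otvor", "open"),
    (37, "l", "sub", "polica", "open"),
    (37, "l", "sub", "open", "open"),
    (38, "l", "sub", "ostava", "pantry"),
    (38, "l", "sub", "spajz", "pantry"),
    (38, "l", "sub", "pant", "pantry"),
  ]

-- the comprehension's per-entry condition (inline in Source B)
def pvCond (tid lbl : String) (e : Nat × String × String × String × String) : Bool :=
  if e.2.2.1 == "eq" then (if e.2.1 == "t" then tid else lbl) == e.2.2.2.1
  else PySem.Str.isIn e.2.2.2.1 (if e.2.1 == "t" then tid else lbl)

-- Source B: collect all matching keywords, then min by priority (first minimal), default "doors"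
def detect_type_py_alt (m : List (String × String)) : String :=
  let tid := PySem.Str.upper (PySem.Dict.getD (PySem.Dict.mk m) "template_id" "")
  let lbl := PySem.Str.lower (PySem.Dict.getD (PySem.Dict.mk m) "label" "")
  let hits := pvKeywords.filterMap (fun e => if pvCond tid lbl e then some (e.1, e.2.2.2.2) else none)
  match hits with
  | [] => "doors"
  | h :: t => (t.foldl (fun a x => if x.1 < a.1 then x else a) h).2

-- ===== PRECONDITION & SPEC =====
def Spec_detect_type_py (m : List (String × String)) (out : String) : Prop := out = detect_type_py_alt m
instance (m : List (String × String)) (out : String) : Decidable (Spec_detect_type_py m out) := by unfold Spec_detect_type_py; infer_instance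

-- ===== CLAIM =====
def Claim_equal_detect_type_py : Prop := ∀ (m : List (String × String)), Dom_detect_type_py m → Spec_detect_type_py m (detect_type_py m)

-- ===== LEMMAS AND PROOFS =====
-- first-match reading of a keyword table
def pvFirstSel (tid lbl : String) : List (Nat × String × String × String × String) → String
  | [] => "doors"
  | e :: t => if pvCond tid lbl e then e.2.2.2.2 else pvFirstSel tid lbl t

theorem pvFoldMin_head (h : Nat × String) (t : List (Nat × String))
    (hle : ∀ x ∈ t, h.1 ≤ x.1) :
    t.foldl (fun a x => if x.1 < a.1 then x else a) h = h := by
  induction t with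
  | nil => rfl
  | cons x t ih =>
    have hx : h.1 ≤ x.1 := hle x (List.mem_cons_self ..)
    simp only [List.foldl_cons, if_neg (by omega : ¬ x.1 < h.1)]
    exact ih (fun y hy => hle y (List.mem_cons_of_mem _ hy))

-- collect-then-argmin over a priority-sorted table equals first-match
theorem pvSelect_eq_firstSel (tid lbl : String)
    (es : List (Nat × String × String × String × String))
    (hs : es.Pairwise (fun a b => a.1 ≤ b.1)) :
    (match es.filterMap (fun e => if pvCond tid lbl e then some (e.1, e.2.2.2.2) else none) with
     | [] => "doors"
     | h :: t => (t.foldl (fun a x => if x.1 < a.1 then x else a) h).2) = pvFirstSel tid lbl es := by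
  induction es with
  | nil => rfl
  | cons e t ih =>
    rcases List.pairwise_cons.mp hs with ⟨hhead, htail⟩
    simp only [List.filterMap_cons, pvFirstSel]
    by_cases hc : pvCond tid lbl e
    · simp only [hc, if_true]
      have hle : ∀ x ∈ t.filterMap (fun e => if pvCond tid lbl e then some (e.1, e.2.2.2.2) else none),
          (e.1, e.2.2.2.2).1 ≤ x.1 := by
        intro x hx
        rcases List.mem_filterMap.mp hx with ⟨y, hy, hfy⟩
        by_cases hcy : pvCond tid lbl y
        · simp only [hcy, if_true, Option.some.injEq] at hfy
          have := hhead y hy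
          simp [← hfy]
          omega
        · simp [hcy] at hfy
      rw [pvFoldMin_head _ _ hle]
    · simp only [hc, if_false, Bool.false_eq_true]
      exact ih htail

-- merging consecutive equal-result branches into one ||-guarded branch
theorem pv_if_or (a b : Bool) (x y : String) :
    (if a then x else if b then x else y) = (if (a || b) then x else y) := by
  cases a <;> cases b <;> simp

theorem pvKeywords_sorted : pvKeywords.Pairwise (fun a b => a.1 ≤ b.1) := by decide

-- the first-match reading of the literal table is exactly A's if-chain
theorem pvFirstSel_keywords (tid lbl : String) :
    pvFirstSel tid lbl pvKeywords =
    (if tid == "BASE_DISHWASHER_FREESTANDING" then "dishwasher_freestanding" else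
     if tid == "BASE_OVEN_HOB_FREESTANDING" then "oven_hob_freestanding" else
     if PySem.Str.isIn "DISHWASHER" tid then "dishwasher" else
     if PySem.Str.isIn "END_PANEL" tid then "panel" else
     if PySem.Str.isIn "FILLER_PANEL" tid then "panel" else
     if PySem.Str.isIn "COOKING_UNIT" tid then "oven_hob" else
     if PySem.Str.isIn "OVEN_HOB" tid then "oven_hob" else
     if PySem.Str.isIn "HOB" tid then "hob" else
     if PySem.Str.isIn "SINK" tid then "sink" else
     if PySem.Str.isIn "OVEN_MICRO" tid then "oven_micro" else
     if PySem.Str.isIn "OVEN" tid then "oven" else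
     if PySem.Str.isIn "FRIDGE_FREEZE" tid then "fridge" else
     if PySem.Str.isIn "FRIDGE_UNDER" tid then "fridge_under" else
     if PySem.Str.isIn "FRIDGE" tid then "fridge" else
     if PySem.Str.isIn "HOOD" tid then "hood" else
     if PySem.Str.isIn "MICRO" tid then "microwave" else
     if PySem.Str.isIn "NARROW" tid then "narrow" else
     if PySem.Str.isIn "CORNER" tid then "corner" else
     if PySem.Str.isIn "GLASS" tid then "glass" else
     if PySem.Str.isIn "LIFTUP" tid then "liftup" else
     if PySem.Str.isIn "DRAWERS" tid then "drawers" else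
     if PySem.Str.isIn "DOORS_DRAW" tid then "doors_drawers" else
     if PySem.Str.isIn "DOOR_DRAWER" tid then "doors_drawers" else
     if PySem.Str.isIn "OPEN" tid then "open" else
     if PySem.Str.isIn "PANTRY" tid then "pantry" else
     if PySem.Str.isIn "fiok" lbl || PySem.Str.isIn "ladic" lbl || PySem.Str.isIn "drawer" lbl then "drawers" else
     if PySem.Str.isIn "sudoper" lbl || PySem.Str.isIn "cesm" lbl || PySem.Str.isIn "sink" lbl then "sink" else
     if PySem.Str.isIn "ploc" lbl || PySem.Str.isIn "hob" lbl || PySem.Str.isIn "ringla" lbl then "hob" else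
     if PySem.Str.isIn "rerna" lbl || PySem.Str.isIn "oven" lbl then "oven" else
     if PySem.Str.isIn "masina" lbl || PySem.Str.isIn "dishwash" lbl then "dishwasher" else
     if PySem.Str.isIn "frizider" lbl || PySem.Str.isIn "fridge" lbl then "fridge" else
     if PySem.Str.isIn "napa" lbl || PySem.Str.isIn "aspirat" lbl || PySem.Str.isIn "hood" lbl then "hood" else
     if PySem.Str.isIn "mikrotal" lbl || PySem.Str.isIn "micro" lbl then "microwave" else
     if PySem.Str.isIn "uski" lbl || PySem.Str.isIn "narrow" lbl then "narrow" else
     if PySem.Str.isIn "coskast" lbl || PySem.Str.isIn "ugaon" lbl || PySem.Str.isIn "corner" lbl then "corner" else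
     if PySem.Str.isIn "stakl" lbl || PySem.Str.isIn "glass" lbl then "glass" else
     if PySem.Str.isIn "klapna" lbl || PySem.Str.isIn "podiz" lbl || PySem.Str.isIn "liftup" lbl then "liftup" else
     if PySem.Str.isIn "otvor" lbl || PySem.Str.isIn "polica" lbl || PySem.Str.isIn "open" lbl then "open" else
     if PySem.Str.isIn "ostava" lbl || PySem.Str.isIn "spajz" lbl || PySem.Str.isIn "pant" lbl then "pantry" else
     "doors") := by
  simp only [← pv_if_or, Bool.or_assoc]
  simp only [pvKeywords, pvFirstSel, pvCond,
    show ("eq" == "eq") = true from rfl, show ("sub" == "eq") = false from rfl,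
    show ("t" == "t") = true from rfl, show ("l" == "t") = false from rfl,
    Bool.false_eq_true, if_true, if_false]

-- ===== VERDICT =====
theorem detect_type_py_spec : Claim_equal_detect_type_py := by
  intro m _
  unfold Spec_detect_type_py detect_type_py detect_type_py_alt
  rw [pvSelect_eq_firstSel _ _ _ pvKeywords_sorted, pvFirstSel_keywords]
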